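-- pv_equiv track=rewrite | github.com/Achan40/multimodal-class-acv | scripts/create_pkl.py | divide_array_equal_parts
-- ===== SOURCE A (Python) =====
-- def divide_array_equal_parts(arr, num_parts):
--     '''
--     Dividing an array into equal parts
--     Use so that we can write to our .pkl file in batches
--     '''
--
--     if num_parts <= 0:
--         raise ValueError("Number of parts should be greater than 0.")
--
--     part_size = len(arr) // num_parts
--     remaining_elements = len(arr) % num_parts
--
--     divided_array = []
--     start = 0
--
--     for i in range(num_parts):
--         end = start + part_size + (1 if i < remaining_elements else 0)
--         divided_array.append(arr[start:end])
--         start = end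
--
--     return divided_array
-- ===== SOURCE B (Python) =====
-- def divide_array_equal_parts(arr, num_parts):
--     '''
--     Dividing an array into equal parts
--     Use so that we can write to our .pkl file in batches
--     '''
--
--     if num_parts <= 0:
--         raise ValueError("Number of parts should be greater than 0.")
--
--     # Peel chunks off the BACK: with k parts still to make and `end` elements
--     # left, the last of those parts gets exactly end // k elements; build the
--     # result back-to-front and reverse once at the end.
--     parts = []
--     end = len(arr)
--     for k in range(num_parts, 0, -1):
--         size = end // k
--         parts.append(arr[end - size:end])
--         end -= size
--     parts.reverse()
--     return parts
-- ===== Notes on version B (the rewrite author's own statement) =====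
-- stated objective: alternative
-- what changed: Replaces A's precomputed quotient/remainder forward loop by greedy back-to-front peeling: with k parts still to make and end elements left, slice off the LAST chunk of size end//k, counting k down, then reverse the collected chunks; no remainder variable or per-index comparison exists in B.
import Mathlib
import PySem

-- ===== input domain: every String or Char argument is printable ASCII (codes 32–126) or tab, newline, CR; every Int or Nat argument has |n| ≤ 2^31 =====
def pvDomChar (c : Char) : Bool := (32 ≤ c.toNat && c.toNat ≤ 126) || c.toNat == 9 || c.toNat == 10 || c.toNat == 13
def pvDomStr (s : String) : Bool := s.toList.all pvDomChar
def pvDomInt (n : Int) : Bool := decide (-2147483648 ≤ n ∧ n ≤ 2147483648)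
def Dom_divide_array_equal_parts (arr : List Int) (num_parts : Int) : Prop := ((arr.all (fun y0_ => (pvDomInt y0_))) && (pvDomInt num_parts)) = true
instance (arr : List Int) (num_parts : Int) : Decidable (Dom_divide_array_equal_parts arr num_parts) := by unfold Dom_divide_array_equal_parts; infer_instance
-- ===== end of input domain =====

-- B replaces A's quotient/remainder forward loop by greedy back-to-front peeling
-- (last chunk of the remaining prefix has size end // k, k counting down), then one reverse; same cost.


-- ===== PORT A =====
def divide_array_equal_parts (arr : List Int) (num_parts : Int) : List (List Int) :=
  let part_size := PySem.Int.floordiv (arr.length : Int) num_parts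
  let remaining_elements := PySem.Int.mod (arr.length : Int) num_parts
  ((PySem.List.pyRange 0 num_parts 1).foldl
    (fun (st : List (List Int) × Int) i =>
      let e := st.2 + part_size + (if i < remaining_elements then (1 : Int) else 0)
      (st.1 ++ [PySem.List.slice arr (some st.2) (some e)], e))
    ([], 0)).1

-- ===== PORT B =====
def divide_array_equal_parts_alt (arr : List Int) (num_parts : Int) : List (List Int) :=
  (((PySem.List.pyRange num_parts 0 (-1)).foldl
    (fun (st : List (List Int) × Int) k =>
      let size := PySem.Int.floordiv st.2 k
      (st.1 ++ [PySem.List.slice arr (some (st.2 - size)) (some st.2)], st.2 - size))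
    ([], (arr.length : Int))).1).reverse

-- ===== PRECONDITION & SPEC =====
-- A raises ValueError exactly when num_parts <= 0; Pre_ excludes those inputs.
def Pre_divide_array_equal_parts (arr : List Int) (num_parts : Int) : Prop := 0 < num_parts
instance (arr : List Int) (num_parts : Int) : Decidable (Pre_divide_array_equal_parts arr num_parts) := by unfold Pre_divide_array_equal_parts; infer_instance
def pvWitness_divide_array_equal_parts : List Int × Int := ([1, 2, 3, 4, 5], 2)

def Spec_divide_array_equal_parts (arr : List Int) (num_parts : Int) (out : List (List Int)) : Prop := out = divide_array_equal_parts_alt arr num_parts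
instance (arr : List Int) (num_parts : Int) (out : List (List Int)) : Decidable (Spec_divide_array_equal_parts arr num_parts out) := by unfold Spec_divide_array_equal_parts; infer_instance

-- ===== CLAIM (what is proved, stated in full; the proofs are below) =====
def Claim_equal_divide_array_equal_parts : Prop := ∀ (arr : List Int) (num_parts : Int), Dom_divide_array_equal_parts arr num_parts → Pre_divide_array_equal_parts arr num_parts → Spec_divide_array_equal_parts arr num_parts (divide_array_equal_parts arr num_parts)

-- ===== LEMMAS AND PROOFS =====

-- The front-loaded chunk boundary: start of chunk i when quotient is q and remainder r.
def pvBnd (q r i : Int) : Int := i * q + min i r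

lemma pvBnd_succ (q r i : Int) :
    pvBnd q r (i + 1) = pvBnd q r i + q + (if i < r then (1 : Int) else 0) := by
  unfold pvBnd
  rw [show (i + 1) * q = i * q + q from by ring]
  split_ifs with h <;> omega

lemma pvBnd_div (q r j : Int) (hj : 0 < j) (hr0 : 0 ≤ r) :
    pvBnd q r j / j = q + (if j ≤ r then (1 : Int) else 0) := by
  unfold pvBnd
  by_cases h : j ≤ r
  · rw [min_eq_left h, if_pos h, show j * q + j = j * (q + 1) from by ring,
      Int.mul_ediv_cancel_left _ (ne_of_gt hj)]
  · rw [min_eq_right (by omega), if_neg h, add_comm,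
      Int.add_mul_ediv_left _ _ (ne_of_gt hj),
      Int.ediv_eq_zero_of_lt hr0 (by omega)]
    ring

-- A's forward loop: the running start traverses the boundaries pvBnd in order.
lemma pvFoldA (arr : List Int) (q r : Int) (hr0 : 0 ≤ r) : ∀ (k : Nat) (acc : List (List Int)),
    ((PySem.List.pyRange 0 (k : Int) 1).foldl
      (fun (st : List (List Int) × Int) i =>
        (st.1 ++ [PySem.List.slice arr (some st.2)
            (some (st.2 + q + (if i < r then (1 : Int) else 0)))],
         st.2 + q + (if i < r then (1 : Int) else 0)))
      (acc, 0))
    = (acc ++ (PySem.List.pyRange 0 (k : Int) 1).map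
        (fun i => PySem.List.slice arr (some (pvBnd q r i)) (some (pvBnd q r (i + 1)))),
       pvBnd q r (k : Int)) := by
  intro k
  induction k with
  | zero =>
    intro acc
    rw [PySem.List.pyRange_one_eq_nil (by simp)]
    unfold pvBnd
    simp
    omega
  | succ k ih =>
    intro acc
    rw [show ((k + 1 : Nat) : Int) = (k : Int) + 1 from by push_cast; ring,
      PySem.List.pyRange_one_succ_right (by positivity), List.foldl_append, ih,
      List.map_append]
    simp only [List.foldl_cons, List.foldl_nil, List.map_cons, List.map_nil, ← List.append_assoc]
    rw [← pvBnd_succ]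

-- B's countdown loop: peeling end // k off the back traverses the same boundaries in reverse.
lemma pvFoldB (arr : List Int) (q r : Int) (hr0 : 0 ≤ r) : ∀ (j : Nat) (acc : List (List Int)),
    ((PySem.List.pyRange (j : Int) 0 (-1)).foldl
      (fun (st : List (List Int) × Int) k =>
        (st.1 ++ [PySem.List.slice arr (some (st.2 - PySem.Int.floordiv st.2 k)) (some st.2)],
         st.2 - PySem.Int.floordiv st.2 k))
      (acc, pvBnd q r (j : Int)))
    = (acc ++ ((PySem.List.pyRange 0 (j : Int) 1).map
        (fun i => PySem.List.slice arr (some (pvBnd q r i)) (some (pvBnd q r (i + 1))))).reverse,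
       0) := by
  intro j
  induction j with
  | zero =>
    intro acc
    rw [PySem.List.pyRange_neg_one_eq_nil (by simp), PySem.List.pyRange_one_eq_nil (by simp)]
    unfold pvBnd
    simp
    omega
  | succ j ih =>
    intro acc
    rw [show ((j + 1 : Nat) : Int) = (j : Int) + 1 from by push_cast; ring]
    rw [PySem.List.pyRange_neg_one_cons (by positivity), show (j : Int) + 1 - 1 = (j : Int) from by ring]
    have hsize : PySem.Int.floordiv (pvBnd q r ((j : Int) + 1)) ((j : Int) + 1)
        = pvBnd q r ((j : Int) + 1) - pvBnd q r (j : Int) := by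
      rw [PySem.Int.floordiv_eq_ediv_of_pos (by positivity),
        pvBnd_div q r _ (by positivity) hr0, pvBnd_succ]
      simp only [Int.add_one_le_iff]
      split_ifs <;> ring
    simp only [List.foldl_cons, hsize]
    rw [show pvBnd q r ((j : Int) + 1) - (pvBnd q r ((j : Int) + 1) - pvBnd q r (j : Int))
        = pvBnd q r (j : Int) from by ring, ih,
      PySem.List.pyRange_one_succ_right (by positivity), List.map_append, List.reverse_append]
    simp [List.append_assoc]

-- ===== VERDICT (by name: the statement is the Claim_ definition above) =====
theorem divide_array_equal_parts_spec : Claim_equal_divide_array_equal_parts := by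
  intro arr num_parts _ hPre
  unfold Pre_divide_array_equal_parts at hPre
  unfold Spec_divide_array_equal_parts divide_array_equal_parts divide_array_equal_parts_alt
  have hk : ((num_parts.toNat : Nat) : Int) = num_parts := Int.toNat_of_nonneg (le_of_lt hPre)
  set n : Int := (arr.length : Int) with hn
  set q : Int := n / num_parts with hq
  set r : Int := n % num_parts with hr
  have hr0 : 0 ≤ r := Int.emod_nonneg n (ne_of_gt hPre)
  have hrlt : r < num_parts := Int.emod_lt_of_pos n hPre
  have hbndn : n = pvBnd q r num_parts := by
    unfold pvBnd
    rw [min_eq_right (le_of_lt hrlt)]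
    have := Int.mul_ediv_add_emod n num_parts
    rw [hq, hr]
    omega
  simp only [PySem.Int.floordiv_eq_ediv_of_pos hPre, PySem.Int.mod_eq_emod_of_pos hPre,
    ← hq, ← hr]
  rw [hbndn, ← hk]
  rw [pvFoldA arr q r hr0 num_parts.toNat [], pvFoldB arr q r hr0 num_parts.toNat []]
  simp
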